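-- pv_equiv track=rewrite | github.com/Apizh/algorithms_2022 | Урок 1. Практическое задание/task_2.py | quadratic
-- ===== SOURCE A (Python) =====
-- def quadratic(lst):
--     for i in lst:
--         is_min = True
--         for j in lst:
--             if i > j:
--                 is_min = False
--         if is_min:
--             return i
-- ===== SOURCE B (Python) =====
-- def quadratic(lst):
--     m = None
--     for x in lst:
--         if m is None or x < m:
--             m = x
--     return m
-- ===== Notes on version B (the rewrite author's own statement) =====
-- stated objective: faster
-- what changed: Replaced the nested scan (for each element, check it against every element) by a single pass that tracks the running minimum and returns it.
import Mathlib
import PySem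

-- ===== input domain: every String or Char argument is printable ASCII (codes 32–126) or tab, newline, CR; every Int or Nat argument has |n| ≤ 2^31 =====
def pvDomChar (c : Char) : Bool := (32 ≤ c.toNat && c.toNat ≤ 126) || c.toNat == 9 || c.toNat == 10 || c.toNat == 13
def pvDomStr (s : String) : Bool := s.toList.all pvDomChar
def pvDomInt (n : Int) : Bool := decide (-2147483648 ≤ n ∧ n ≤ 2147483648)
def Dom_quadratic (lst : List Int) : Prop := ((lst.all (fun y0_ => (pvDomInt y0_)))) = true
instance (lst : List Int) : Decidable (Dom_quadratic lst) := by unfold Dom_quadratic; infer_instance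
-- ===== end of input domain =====

-- B replaces A's nested scan by a single pass tracking the running minimum (O(n) vs O(n^2)).

-- ===== PORT A =====
-- inner loop: 'is_min = True; for j in lst: if i > j: is_min = False'
def quadraticIsMin (i : Int) (full : List Int) : Bool :=
  full.foldl (fun b j => if i > j then false else b) true

-- outer loop over lst, inner loop over the full list; first i with is_min is returned
def quadraticGo (full : List Int) : List Int → Option Int
  | [] => none
  | i :: rest => if quadraticIsMin i full then some i else quadraticGo full rest

def quadratic (lst : List Int) : Option Int := quadraticGo lst lst

-- ===== PORT B =====
-- single pass: m = None; for x in lst: if m is None or x < m: m = x; return m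
def quadratic_alt (lst : List Int) : Option Int :=
  lst.foldl (fun m x =>
    match m with
    | none => some x
    | some v => if x < v then some x else some v) none

-- ===== PRECONDITION & SPEC =====
def Spec_quadratic (lst : List Int) (out : Option Int) : Prop := out = quadratic_alt lst
instance (lst : List Int) (out : Option Int) : Decidable (Spec_quadratic lst out) := by unfold Spec_quadratic; infer_instance

-- ===== CLAIM (what is proved, stated in full; the proofs are below) =====
def Claim_equal_quadratic : Prop := ∀ (lst : List Int), Dom_quadratic lst → Spec_quadratic lst (quadratic lst)

-- ===== LEMMAS AND PROOFS =====

-- A's inner flag computes "i ≤ every element of full"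
theorem isMin_aux (i : Int) (l : List Int) (b : Bool) :
    l.foldl (fun b j => if i > j then false else b) b = (b && l.all (fun j => decide (i ≤ j))) := by
  induction l generalizing b with
  | nil => simp
  | cons x xs ih =>
    simp only [List.foldl_cons, List.all_cons, ih]
    by_cases h : x < i
    · simp [h]
    · simp [h, (by omega : i ≤ x)]

theorem isMin_eq (i : Int) (full : List Int) :
    quadraticIsMin i full = full.all (fun j => decide (i ≤ j)) := by
  rw [quadraticIsMin, isMin_aux, Bool.true_and]

-- A's outer loop is find? over the suffix
theorem go_eq_find (full rest : List Int) :
    quadraticGo full rest = rest.find? (fun i => quadraticIsMin i full) := by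
  induction rest with
  | nil => rfl
  | cons x xs ih =>
    simp only [quadraticGo, List.find?_cons, ih]
    by_cases h : quadraticIsMin x full <;> simp [h]

-- B computes the fold of min on nonempty lists
theorem alt_aux (x : Int) (xs : List Int) :
    xs.foldl (fun m y =>
      match m with
      | none => some y
      | some v => if y < v then some y else some v) (some x) = some (xs.foldl min x) := by
  induction xs generalizing x with
  | nil => rfl
  | cons y ys ih =>
    simp only [List.foldl_cons]
    by_cases h : y < x
    · rw [if_pos h, ih, min_eq_right (le_of_lt h)]
    · rw [if_neg h, ih, min_eq_left (by omega)]

theorem alt_cons (x : Int) (xs : List Int) :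
    quadratic_alt (x :: xs) = some (xs.foldl min x) := by
  simp [quadratic_alt, alt_aux]

theorem foldl_min_mem (x : Int) (xs : List Int) : xs.foldl min x ∈ x :: xs := by
  induction xs generalizing x with
  | nil => simp
  | cons y ys ih =>
    simp only [List.foldl_cons]
    rcases List.mem_cons.mp (ih (min x y)) with h | h
    · rw [h]
      rcases min_choice x y with hm | hm <;> rw [hm] <;> simp
    · simp [h]

theorem foldl_min_le (x : Int) (xs : List Int) :
    ∀ j ∈ x :: xs, xs.foldl min x ≤ j := by
  induction xs generalizing x with
  | nil => simp
  | cons y ys ih =>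
    intro j hj
    simp only [List.foldl_cons]
    have hmin : List.foldl min (min x y) ys ≤ min x y := ih (min x y) (min x y) (by simp)
    rcases List.mem_cons.mp hj with h | h
    · subst h; exact le_trans hmin (min_le_left _ _)
    · rcases List.mem_cons.mp h with h2 | h2
      · subst h2; exact le_trans hmin (min_le_right _ _)
      · exact ih (min x y) j (List.mem_cons_of_mem _ h2)

-- ===== VERDICT (by name: the statement is the Claim_ definition above) =====
theorem quadratic_spec : Claim_equal_quadratic := by
  intro lst _
  unfold Spec_quadratic
  cases lst with
  | nil => rfl
  | cons x xs =>
    rw [alt_cons, quadratic, go_eq_find]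
    set m := xs.foldl min x with hm
    have hmem : m ∈ x :: xs := foldl_min_mem x xs
    have hle : ∀ j ∈ x :: xs, m ≤ j := foldl_min_le x xs
    have hpm : quadraticIsMin m (x :: xs) = true := by
      rw [isMin_eq]; simp only [List.all_eq_true, decide_eq_true_eq]; exact hle
    -- find? returns some e with the property; e = m by antisymmetry
    have hsome : (List.find? (fun i => quadraticIsMin i (x :: xs)) (x :: xs)).isSome :=
      List.find?_isSome.mpr ⟨m, hmem, hpm⟩
    obtain ⟨e, he⟩ := Option.isSome_iff_exists.mp hsome
    rw [he]
    have hemem := List.mem_of_find?_eq_some he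
    have hpe := List.find?_some he
    rw [isMin_eq] at hpe
    simp only [List.all_eq_true, decide_eq_true_eq] at hpe
    have h1 : e ≤ m := hpe m hmem
    have h2 : m ≤ e := hle e hemem
    have : e = m := le_antisymm h1 h2
    simp [this]
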